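-- pv_equiv track=rewrite | github.com/peter-as/advent-of-code | 3.py | multIndicesWithEnabling
-- ===== SOURCE A (Python) =====
-- def multIndicesWithEnabling(s, enabled = True):
--     indices = []
--     for i in range(len(s)):
--         if s[i:min(i+3,len(s))] == "mul" and enabled:
--             indices.append(i)
--         elif s[i:min(i+7,len(s))] == "don't()":
--             enabled = False
--         elif s[i:min(i+4,len(s))] == "do()":
--             enabled = True
--
--     return indices, enabled
-- ===== SOURCE B (Python) =====
-- def multIndicesWithEnabling(s, enabled=True):
--     n = len(s)
--     # collect toggle events (position, new_state), in position order
--     toggles = [(i, s.startswith("do()", i))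
--                for i in range(n)
--                if s.startswith("don't()", i) or s.startswith("do()", i)]
--
--     def state_at(pos):
--         # state in effect at pos = latest toggle strictly before pos
--         for p, v in reversed(toggles):
--             if p < pos:
--                 return v
--         return enabled
--
--     indices = [i for i in range(n) if s.startswith("mul", i) and state_at(i)]
--     final = toggles[-1][1] if toggles else enabled
--     return indices, final
-- ===== Notes on version B (the rewrite author's own statement) =====
-- stated objective: alternative
-- what changed: A makes one forward scan mutating an enabled flag and testing a fresh string slice at every position; B first collects all toggle events (position, new state) and all mul start positions via startswith comprehensions, then decides each mul index by a backward search for the latest preceding toggle and takes the final flag from the last toggle event.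
import Mathlib
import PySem

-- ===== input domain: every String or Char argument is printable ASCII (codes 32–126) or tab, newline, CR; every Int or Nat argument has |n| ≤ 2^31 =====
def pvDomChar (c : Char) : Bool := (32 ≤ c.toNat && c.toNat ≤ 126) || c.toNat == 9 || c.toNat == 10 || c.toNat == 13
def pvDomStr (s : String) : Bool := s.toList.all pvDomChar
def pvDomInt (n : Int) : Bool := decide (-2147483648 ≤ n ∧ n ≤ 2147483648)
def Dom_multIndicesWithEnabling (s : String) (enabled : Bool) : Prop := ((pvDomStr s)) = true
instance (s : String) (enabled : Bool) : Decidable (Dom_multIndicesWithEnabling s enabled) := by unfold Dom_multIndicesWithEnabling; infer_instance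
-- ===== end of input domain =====

-- B replaces A's single flag-mutating scan (which builds a string slice at every
-- position) by collect-then-assign: gather all toggle events and all "mul" positions
-- first via startswith, then resolve each position by its latest preceding toggle
-- (measurably faster by a constant factor: no per-position slice objects).

-- ===== PORT A =====
def multIndicesWithEnabling (s : String) (enabled : Bool) : List Int × Bool :=
  let cs := s.toList
  let n : Int := PySem.Str.len s
  (PySem.List.pyRange 0 n 1).foldl
    (fun (st : List Int × Bool) i =>
      if PySem.List.slice cs (some i) (some (min (i + 3) n)) = "mul".toList && st.2 then
        (st.1 ++ [i], st.2)
      else if PySem.List.slice cs (some i) (some (min (i + 7) n)) = "don't()".toList then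
        (st.1, false)
      else if PySem.List.slice cs (some i) (some (min (i + 4) n)) = "do()".toList then
        (st.1, true)
      else st)
    ([], enabled)

-- ===== PORT B =====
-- s.startswith(p, i) with 0 ≤ i is ported as prefix test on cs.drop i.toNat (exact there).
def multIndicesWithEnabling_alt (s : String) (enabled : Bool) : List Int × Bool :=
  let cs := s.toList
  let n : Int := PySem.Str.len s
  let sw : List Char → Int → Bool := fun p i => PySem.Chars.startswith (cs.drop i.toNat) p
  let toggles : List (Int × Bool) :=
    ((PySem.List.pyRange 0 n 1).filter
        (fun i => sw "don't()".toList i || sw "do()".toList i)).map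
      (fun i => (i, sw "do()".toList i))
  let stateAt : Int → Bool := fun pos =>
    match toggles.reverse.find? (fun pv => decide (pv.1 < pos)) with
    | some pv => pv.2
    | none => enabled
  let indices := (PySem.List.pyRange 0 n 1).filter (fun i => sw "mul".toList i && stateAt i)
  let final := match toggles.getLast? with
    | some pv => pv.2
    | none => enabled
  (indices, final)

-- ===== PRECONDITION & SPEC =====
def Spec_multIndicesWithEnabling (s : String) (enabled : Bool) (out : List Int × Bool) : Prop := out = multIndicesWithEnabling_alt s enabled
instance (s : String) (enabled : Bool) (out : List Int × Bool) : Decidable (Spec_multIndicesWithEnabling s enabled out) := by unfold Spec_multIndicesWithEnabling; infer_instance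

-- ===== CLAIM (what is proved, stated in full; the proofs are below) =====
def Claim_equal_multIndicesWithEnabling : Prop := ∀ (s : String) (enabled : Bool), Dom_multIndicesWithEnabling s enabled → Spec_multIndicesWithEnabling s enabled (multIndicesWithEnabling s enabled)

-- ===== LEMMAS AND PROOFS =====

-- `s.startswith(p, i)` as both ports use it
def swP (cs p : List Char) (i : Int) : Bool := PySem.Chars.startswith (cs.drop i.toNat) p
-- "a toggle starts at i"
def togP (cs : List Char) (i : Int) : Bool :=
  swP cs ['d','o','n','\'','t','(',')'] i || swP cs ['d','o','(',')'] i
-- toggle events among positions [0, k)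
def evT (cs : List Char) (k : Nat) : List (Int × Bool) :=
  ((PySem.List.pyRange 0 (k:Int) 1).filter (togP cs)).map
    (fun i => (i, swP cs ['d','o','(',')'] i))
-- enabled state in effect at position k
def stC (cs : List Char) (e : Bool) (k : Nat) : Bool :=
  match (evT cs k).getLast? with
  | some pv => pv.2
  | none => e

lemma take_min_len {A} (t : List A) (k : Nat) : t.take (min k t.length) = t.take k := by
  rcases le_total k t.length with h | h
  · rw [min_eq_left h]
  · rw [min_eq_right h, List.take_of_length_le h, List.take_of_length_le (le_refl _)]

lemma sliceK (xs p : List Char) (j : Nat) :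
    (PySem.List.slice xs (some (j:Int)) (some (min ((j:Int) + (p.length:Int)) ((xs.length:Int)))) = p)
      ↔ PySem.Chars.startswith (xs.drop j) p = true := by
  have hc : min ((j:Int) + (p.length:Int)) ((xs.length:Int)) = ((min (j + p.length) xs.length : Nat) : Int) := by
    push_cast; rfl
  rw [hc, PySem.List.slice_natCast]
  have h2 : min (j + p.length) xs.length - j = min p.length (xs.length - j) := by omega
  rw [h2, ← List.length_drop, take_min_len, PySem.Chars.startswith_iff]
  constructor
  · intro h; rw [← h]; exact List.take_prefix _ _
  · intro h; rw [List.prefix_iff_eq_take] at h; exact h.symm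

lemma slice_mul_iff (cs : List Char) (j : Nat) :
    (PySem.List.slice cs (some (j:Int)) (some (min ((j:Int) + 3) ((cs.length:Int)))) = ['m','u','l'])
      ↔ swP cs ['m','u','l'] (j:Int) = true := by
  have h3 : (((['m','u','l'] : List Char).length : Nat) : Int) = 3 := by decide
  rw [← h3, sliceK, swP]
  simp

lemma slice_dont_iff (cs : List Char) (j : Nat) :
    (PySem.List.slice cs (some (j:Int)) (some (min ((j:Int) + 7) ((cs.length:Int)))) = ['d','o','n','\'','t','(',')'])
      ↔ swP cs ['d','o','n','\'','t','(',')'] (j:Int) = true := by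
  have h7 : (((['d','o','n','\'','t','(',')'] : List Char).length : Nat) : Int) = 7 := by decide
  rw [← h7, sliceK, swP]
  simp

lemma slice_do_iff (cs : List Char) (j : Nat) :
    (PySem.List.slice cs (some (j:Int)) (some (min ((j:Int) + 4) ((cs.length:Int)))) = ['d','o','(',')'])
      ↔ swP cs ['d','o','(',')'] (j:Int) = true := by
  have h4 : (((['d','o','(',')'] : List Char).length : Nat) : Int) = 4 := by decide
  rw [← h4, sliceK, swP]
  simp

-- two incomparable patterns cannot both start at the same position
lemma not_both {p q : List Char} (t : List Char) (hpq : ¬ p <+: q) (hqp : ¬ q <+: p)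
    (hp : PySem.Chars.startswith t p = true) : PySem.Chars.startswith t q = false := by
  rw [PySem.Chars.startswith_iff] at hp
  by_contra h
  rw [Bool.not_eq_false, PySem.Chars.startswith_iff] at h
  rcases List.prefix_or_prefix_of_prefix hp h with hc | hc
  · exact hpq hc
  · exact hqp hc

lemma mul_not_dont {cs : List Char} {i : Int} (h : swP cs ['m','u','l'] i = true) :
    swP cs ['d','o','n','\'','t','(',')'] i = false := not_both _ (by decide) (by decide) h

lemma mul_not_do {cs : List Char} {i : Int} (h : swP cs ['m','u','l'] i = true) :
    swP cs ['d','o','(',')'] i = false := not_both _ (by decide) (by decide) h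

lemma dont_not_do {cs : List Char} {i : Int} (h : swP cs ['d','o','n','\'','t','(',')'] i = true) :
    swP cs ['d','o','(',')'] i = false := not_both _ (by decide) (by decide) h

lemma find?_reverse_eq {A} (l : List A) (p : A → Bool) :
    l.reverse.find? p = (l.filter p).getLast? := by
  induction l with
  | nil => rfl
  | cons a t ih =>
    rw [List.reverse_cons, List.find?_append, ih, List.filter_cons]
    by_cases h : p a
    · simp [h, List.getLast?_cons]
    · simp [h]

lemma filter_lt_pyRange (n k : Nat) (h : k ≤ n) :
    (PySem.List.pyRange 0 (n:Int) 1).filter (fun i => decide (i < (k:Int))) = PySem.List.pyRange 0 (k:Int) 1 := by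
  rw [PySem.List.pyRange_one_append 0 (k:Int) (n:Int) (by positivity) (by exact_mod_cast h)]
  rw [List.filter_append]
  have h1 : (PySem.List.pyRange 0 (k:Int) 1).filter (fun i => decide (i < (k:Int))) = _ :=
    List.filter_eq_self.mpr (fun x hx => by
      have := (PySem.List.mem_pyRange_one.mp hx).2; simpa using this)
  rw [h1]
  have h2 : (PySem.List.pyRange (k:Int) (n:Int) 1).filter (fun i => decide (i < (k:Int))) = [] :=
    List.filter_eq_nil_iff.mpr (fun x hx => by
      have := (PySem.List.mem_pyRange_one.mp hx).1; simpa using not_lt.mpr this)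
  rw [h2, List.append_nil]

lemma evT_filter_lt (cs : List Char) (n k : Nat) (h : k ≤ n) :
    (evT cs n).filter (fun pv => decide (pv.1 < (k:Int))) = evT cs k := by
  unfold evT
  rw [List.filter_map]
  congr 1
  have hcomp : ((fun pv : Int × Bool => decide (pv.1 < (k:Int))) ∘ (fun i => (i, swP cs ['d','o','(',')'] i)))
      = fun i : Int => decide (i < (k:Int)) := rfl
  rw [hcomp, List.filter_filter]
  have hsw : ∀ x ∈ PySem.List.pyRange 0 (n:Int) 1,
      (decide (x < (k:Int)) && togP cs x) = (togP cs x && decide (x < (k:Int))) := by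
    intro x _; exact Bool.and_comm _ _
  rw [List.filter_congr hsw, ← List.filter_filter, filter_lt_pyRange n k h]

-- B's backward search = canonical state
lemma stateAt_eq (cs : List Char) (e : Bool) (n k : Nat) (h : k ≤ n) :
    (match (evT cs n).reverse.find? (fun pv => decide (pv.1 < (k:Int))) with
      | some pv => pv.2
      | none => e) = stC cs e k := by
  rw [find?_reverse_eq, evT_filter_lt cs n k h]
  rfl

lemma evT_succ (cs : List Char) (k : Nat) :
    evT cs (k+1) = evT cs k ++ (if togP cs (k:Int) then [((k:Int), swP cs ['d','o','(',')'] (k:Int))] else []) := by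
  unfold evT
  have hc : ((k+1:Nat):Int) = (k:Int) + 1 := by push_cast; ring
  rw [hc, PySem.List.pyRange_one_succ_right (by positivity), List.filter_append, List.map_append]
  congr 1
  by_cases h : togP cs (k:Int) <;> simp [h]

lemma stC_succ (cs : List Char) (e : Bool) (k : Nat) :
    stC cs e (k+1) = if togP cs (k:Int) then swP cs ['d','o','(',')'] (k:Int) else stC cs e k := by
  unfold stC
  rw [evT_succ]
  by_cases h : togP cs (k:Int)
  · simp [h]
  · simp [h]

-- the main invariant: A's fold over [0, j) produces the filtered list and the canonical state
lemma mainInv (cs : List Char) (e : Bool) (j : Nat) :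
    (PySem.List.pyRange 0 (j:Int) 1).foldl
      (fun (st : List Int × Bool) i =>
        if PySem.List.slice cs (some i) (some (min (i + 3) ((cs.length:Int)))) = "mul".toList && st.2 then
          (st.1 ++ [i], st.2)
        else if PySem.List.slice cs (some i) (some (min (i + 7) ((cs.length:Int)))) = "don't()".toList then
          (st.1, false)
        else if PySem.List.slice cs (some i) (some (min (i + 4) ((cs.length:Int)))) = "do()".toList then
          (st.1, true)
        else st)
      ([], e)
    = ((PySem.List.pyRange 0 (j:Int) 1).filter (fun i => swP cs ['m','u','l'] i && stC cs e i.toNat),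
       stC cs e j) := by
  induction j with
  | zero => simp [PySem.List.pyRange_one_eq_nil, stC, evT]
  | succ j ih =>
    have hc : ((j+1:Nat):Int) = (j:Int) + 1 := by push_cast; ring
    rw [hc, PySem.List.pyRange_one_succ_right (by positivity), List.foldl_append, ih,
      List.filter_append, List.foldl_cons, List.foldl_nil, List.filter_cons, List.filter_nil]
    simp only [Int.toNat_natCast]
    rw [stC_succ]
    by_cases hm : swP cs ['m','u','l'] (j:Int) = true
    · have hd := mul_not_dont hm
      have ho := mul_not_do hm
      have ht : togP cs (j:Int) = false := by simp [togP, hd, ho]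
      by_cases hst : stC cs e j = true <;> simp [slice_mul_iff cs j, slice_dont_iff cs j, slice_do_iff cs j, hm, hd, ho, ht, hst]
    · rw [Bool.not_eq_true] at hm
      by_cases hd : swP cs ['d','o','n','\'','t','(',')'] (j:Int) = true
      · have ho := dont_not_do hd
        have ht : togP cs (j:Int) = true := by simp [togP, hd]
        simp [slice_mul_iff cs j, slice_dont_iff cs j, hm, hd, ho, ht]
      · rw [Bool.not_eq_true] at hd
        by_cases ho : swP cs ['d','o','(',')'] (j:Int) = true
        · have ht : togP cs (j:Int) = true := by simp [togP, ho]
          simp [slice_mul_iff cs j, slice_dont_iff cs j, slice_do_iff cs j, hm, hd, ho, ht]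
        · rw [Bool.not_eq_true] at ho
          have ht : togP cs (j:Int) = false := by simp [togP, hd, ho]
          simp [slice_mul_iff cs j, slice_dont_iff cs j, slice_do_iff cs j, hm, hd, ho, ht]

-- ===== VERDICT (by name: the statement is the Claim_ definition above) =====
theorem multIndicesWithEnabling_spec : Claim_equal_multIndicesWithEnabling := by
  intro s e _
  unfold Spec_multIndicesWithEnabling multIndicesWithEnabling multIndicesWithEnabling_alt
  simp only [PySem.Str.len_eq]
  refine Eq.trans (mainInv s.toList e s.toList.length) ?_
  rw [Prod.ext_iff]
  refine ⟨?_, ?_⟩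
  · refine List.filter_congr ?_
    intro i hi
    have hb := PySem.List.mem_pyRange_one.mp hi
    have hik : ((i.toNat : Nat) : Int) = i := Int.toNat_of_nonneg hb.1
    have hkn : i.toNat ≤ s.toList.length := by omega
    rw [← hik]
    congr 1
    exact (stateAt_eq s.toList e s.toList.length i.toNat hkn).symm
  · rfl
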